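-- pv_equiv track=rewrite | github.com/AnandMaha/CS218_Algorithms | challenge_4/toy_funness.py | max_happiness
-- ===== SOURCE A (Python) =====
-- def max_happiness(toys):
--     curr_toy = -1
--     cumm_tot = 0
--     res = 0
--     for toy in toys:
--         if curr_toy < toy:
--             curr_toy = toy
--             cumm_tot += curr_toy
--         res += cumm_tot
--     return res
-- ===== SOURCE B (Python) =====
-- def max_happiness(toys):
--     toys = list(toys)
--     n = len(toys)
--     curr = -1
--     res = 0
--     for i, toy in enumerate(toys):
--         if curr < toy:
--             curr = toy
--             res += toy * (n - i)
--     return res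
-- ===== Notes on version B (the rewrite author's own statement) =====
-- stated objective: alternative
-- what changed: Replaces A's running cumulative total added on every iteration with a contribution-counting single pass: each new running-max record toy at index i adds toy*(n-i) once, so the per-iteration accumulator disappears.
import Mathlib
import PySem

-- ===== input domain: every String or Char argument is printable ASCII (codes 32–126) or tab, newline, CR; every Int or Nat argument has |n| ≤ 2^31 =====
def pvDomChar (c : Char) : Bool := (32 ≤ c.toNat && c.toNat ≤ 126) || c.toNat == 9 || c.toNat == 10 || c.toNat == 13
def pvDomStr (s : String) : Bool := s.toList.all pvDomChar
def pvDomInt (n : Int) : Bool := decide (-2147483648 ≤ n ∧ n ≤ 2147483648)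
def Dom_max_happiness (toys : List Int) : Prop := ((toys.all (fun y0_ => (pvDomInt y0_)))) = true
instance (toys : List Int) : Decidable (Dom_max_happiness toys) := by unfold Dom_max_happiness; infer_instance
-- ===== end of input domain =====

-- B replaces A's per-iteration cumulative accumulator with one-shot record contributions toy*(n-i); alternative decomposition, same O(n) cost.

-- ===== PORT A =====
-- state: (curr_toy, cumm_tot, res), folded over toys exactly as A's loop
def max_happiness (toys : List Int) : Int :=
  (toys.foldl
    (fun (s : Int × Int × Int) toy =>
      if s.1 < toy then (toy, s.2.1 + toy, s.2.2 + (s.2.1 + toy))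
      else (s.1, s.2.1, s.2.2 + s.2.1))
    (-1, 0, 0)).2.2

-- ===== PORT B =====
-- B's `for i, toy in enumerate(toys)` loop, carrying index i and state (curr, res)
def maxHapBLoop (n : Int) : List Int → Int → Int → Int → Int
  | [], _, _, res => res
  | toy :: ts, i, curr, res =>
      if curr < toy then maxHapBLoop n ts (i + 1) toy (res + toy * (n - i))
      else maxHapBLoop n ts (i + 1) curr res

def max_happiness_alt (toys : List Int) : Int :=
  maxHapBLoop (toys.length : Int) toys 0 (-1) 0

-- ===== PRECONDITION & SPEC =====
def Spec_max_happiness (toys : List Int) (out : Int) : Prop := out = max_happiness_alt toys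
instance (toys : List Int) (out : Int) : Decidable (Spec_max_happiness toys out) := by unfold Spec_max_happiness; infer_instance

-- ===== CLAIM (what is proved, stated in full; the proofs are below) =====
def Claim_equal_max_happiness : Prop := ∀ (toys : List Int), Dom_max_happiness toys → Spec_max_happiness toys (max_happiness toys)

-- ===== LEMMAS AND PROOFS =====

-- common spec: sum of record contributions weighted by remaining suffix length
def maxHapG : List Int → Int → Int
  | [], _ => 0
  | t :: ts, curr =>
      if curr < t then t * (1 + (ts.length : Int)) + maxHapG ts t
      else maxHapG ts curr

theorem maxHapA_eq (l : List Int) : ∀ (curr cumm res : Int),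
    (l.foldl
      (fun (s : Int × Int × Int) toy =>
        if s.1 < toy then (toy, s.2.1 + toy, s.2.2 + (s.2.1 + toy))
        else (s.1, s.2.1, s.2.2 + s.2.1))
      (curr, cumm, res)).2.2 = res + cumm * (l.length : Int) + maxHapG l curr := by
  induction l with
  | nil => intro curr cumm res; simp [maxHapG]
  | cons t ts ih =>
      intro curr cumm res
      simp only [List.foldl_cons, maxHapG]
      by_cases h : curr < t
      · simp only [h, if_pos, ih]
        push_cast [List.length_cons]
        ring
      · simp only [h, if_neg, not_false_iff, ih]
        push_cast [List.length_cons]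
        ring

theorem maxHapB_eq (l : List Int) : ∀ (n i curr res : Int), n = i + (l.length : Int) →
    maxHapBLoop n l i curr res = res + maxHapG l curr := by
  induction l with
  | nil => intro n i curr res _; simp [maxHapBLoop, maxHapG]
  | cons t ts ih =>
      intro n i curr res hn
      simp only [List.length_cons] at hn
      by_cases h : curr < t
      · rw [maxHapBLoop, if_pos h, maxHapG, if_pos h,
          ih n (i + 1) t (res + t * (n - i)) (by push_cast at hn ⊢; omega)]
        have : n - i = 1 + (ts.length : Int) := by push_cast at hn; omega
        rw [this]; ring
      · rw [maxHapBLoop, if_neg h, maxHapG, if_neg h,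
          ih n (i + 1) curr res (by push_cast at hn ⊢; omega)]

-- ===== VERDICT (by name: the statement is the Claim_ definition above) =====
theorem max_happiness_spec : Claim_equal_max_happiness := by
  intro toys _
  unfold Spec_max_happiness max_happiness max_happiness_alt
  rw [maxHapA_eq, maxHapB_eq toys _ 0 (-1) 0 (by omega)]
  ring
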